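-- pv_equiv track=rewrite | github.com/JJassonn69/PLFM_RADAR | fix_via_clearance.py | is_diff_pair
-- ===== SOURCE A (Python) =====
-- def is_diff_pair(net1, net2):
--     """Check if two nets form a differential pair (e.g. OUT8_P and OUT8_N)."""
--     # Strip trailing _P/_N and compare base names
--     for suffix_a, suffix_b in [('_P', '_N'), ('_p', '_n')]:
--         if net1.endswith(suffix_a) and net2.endswith(suffix_b):
--             if net1[:-len(suffix_a)] == net2[:-len(suffix_b)]:
--                 return True
--         if net1.endswith(suffix_b) and net2.endswith(suffix_a):
--             if net1[:-len(suffix_b)] == net2[:-len(suffix_a)]: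
--                 return True
--     return False
-- ===== SOURCE B (Python) =====
-- def _parse(n):
--     """Return (base, is_upper_family, sign) for a net ending in _P/_N/_p/_n, else None."""
--     for suf in ('_P', '_N', '_p', '_n'):
--         if n.endswith(suf):
--             return (n[:-2], suf in ('_P', '_N'), 1 if suf in ('_P', '_p') else -1)
--     return None
--
--
-- def is_diff_pair(net1, net2):
--     a = _parse(net1)
--     b = _parse(net2)
--     if a is None or b is None:
--         return False
--     return a[0] == b[0] and a[1] == b[1] and a[2] == -b[2]
-- ===== Notes on version B (the rewrite author's own statement) =====
-- stated objective: simpler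
-- what changed: B parses each net once into a signature (base, case family, polarity sign) and compares the two signatures, instead of A's loop over ordered suffix-pair combinations with four endswith/slice checks.
import Mathlib
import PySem

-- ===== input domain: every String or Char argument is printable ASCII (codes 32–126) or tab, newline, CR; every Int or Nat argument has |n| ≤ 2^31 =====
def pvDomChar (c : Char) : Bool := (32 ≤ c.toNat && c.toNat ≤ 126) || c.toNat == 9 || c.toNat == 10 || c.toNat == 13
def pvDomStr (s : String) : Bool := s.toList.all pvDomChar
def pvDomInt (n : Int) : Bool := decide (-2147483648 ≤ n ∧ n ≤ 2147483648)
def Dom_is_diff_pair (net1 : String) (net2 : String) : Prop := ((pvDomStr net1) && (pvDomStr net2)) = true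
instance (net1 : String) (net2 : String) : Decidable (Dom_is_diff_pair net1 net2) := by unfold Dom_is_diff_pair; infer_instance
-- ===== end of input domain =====

-- B replaces A's loop over ordered suffix-pair combinations by parsing each net once
-- into a signature (base, case family, polarity sign) and comparing signatures (objective: simpler).

-- ===== PORT A =====
-- the 'for suffix_a, suffix_b in [...]' loop with early 'return True'
def pvLoopA (n1 n2 : List Char) : List (List Char × List Char) → Bool
  | [] => false
  | (sa, sb) :: rest =>
    if PySem.Chars.endswith n1 sa && PySem.Chars.endswith n2 sb &&
        decide (PySem.Chars.slice n1 none (some (-(sa.length : Int))) =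
         PySem.Chars.slice n2 none (some (-(sb.length : Int)))) then true
    else if PySem.Chars.endswith n1 sb && PySem.Chars.endswith n2 sa &&
        decide (PySem.Chars.slice n1 none (some (-(sb.length : Int))) =
         PySem.Chars.slice n2 none (some (-(sa.length : Int)))) then true
    else pvLoopA n1 n2 rest

def is_diff_pair (net1 : String) (net2 : String) : Bool :=
  pvLoopA net1.toList net2.toList [(['_', 'P'], ['_', 'N']), (['_', 'p'], ['_', 'n'])]

-- ===== PORT B =====
-- the 'for suf in (...)' loop of _parse with early return of the signature
def pvParseLoop (n : List Char) : List (List Char) → Option (List Char × Bool × Int)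
  | [] => none
  | suf :: rest =>
    if PySem.Chars.endswith n suf then
      some (PySem.Chars.slice n none (some (-2)),
            suf == ['_', 'P'] || suf == ['_', 'N'],
            if suf == ['_', 'P'] || suf == ['_', 'p'] then 1 else -1)
    else pvParseLoop n rest

def pvParse (n : List Char) : Option (List Char × Bool × Int) :=
  pvParseLoop n [['_', 'P'], ['_', 'N'], ['_', 'p'], ['_', 'n']]

def is_diff_pair_alt (net1 : String) (net2 : String) : Bool :=
  match pvParse net1.toList, pvParse net2.toList with
  | some (b1, c1, s1), some (b2, c2, s2) => decide (b1 = b2) && (c1 == c2) && decide (s1 = -s2)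
  | _, _ => false

-- ===== PRECONDITION & SPEC =====
def Spec_is_diff_pair (net1 : String) (net2 : String) (out : Bool) : Prop := out = is_diff_pair_alt net1 net2
instance (net1 : String) (net2 : String) (out : Bool) : Decidable (Spec_is_diff_pair net1 net2 out) := by unfold Spec_is_diff_pair; infer_instance

-- ===== CLAIM (what is proved, stated in full; the proofs are below) =====
def Claim_equal_is_diff_pair : Prop := ∀ (net1 : String) (net2 : String), Dom_is_diff_pair net1 net2 → Spec_is_diff_pair net1 net2 (is_diff_pair net1 net2)

-- ===== LEMMAS AND PROOFS =====

-- two suffixes of the same length cannot both end a list unless they are equal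
theorem pv_endswith_excl (n s t : List Char) (hlen : s.length = t.length)
    (hs : PySem.Chars.endswith n s = true) (ht : PySem.Chars.endswith n t = true) : s = t := by
  rw [PySem.Chars.endswith_iff] at hs ht
  exact List.IsSuffix.eq_of_length (List.suffix_of_suffix_length_le hs ht (by omega)) hlen

theorem pv_char_equiv (n1 n2 : List Char) :
    pvLoopA n1 n2 [(['_', 'P'], ['_', 'N']), (['_', 'p'], ['_', 'n'])] =
    (match pvParse n1, pvParse n2 with
      | some (b1, c1, s1), some (b2, c2, s2) => decide (b1 = b2) && (c1 == c2) && decide (s1 = -s2)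
      | _, _ => false) := by
  by_cases h1P : PySem.Chars.endswith n1 ['_', 'P'] = true <;>
  by_cases h1N : PySem.Chars.endswith n1 ['_', 'N'] = true <;>
  by_cases h1p : PySem.Chars.endswith n1 ['_', 'p'] = true <;>
  by_cases h1n : PySem.Chars.endswith n1 ['_', 'n'] = true <;>
  by_cases h2P : PySem.Chars.endswith n2 ['_', 'P'] = true <;>
  by_cases h2N : PySem.Chars.endswith n2 ['_', 'N'] = true <;>
  by_cases h2p : PySem.Chars.endswith n2 ['_', 'p'] = true <;>
  by_cases h2n : PySem.Chars.endswith n2 ['_', 'n'] = true <;>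
  first
    | exact absurd (pv_endswith_excl n1 ['_', 'P'] ['_', 'N'] rfl h1P h1N) (by decide)
    | exact absurd (pv_endswith_excl n1 ['_', 'P'] ['_', 'p'] rfl h1P h1p) (by decide)
    | exact absurd (pv_endswith_excl n1 ['_', 'P'] ['_', 'n'] rfl h1P h1n) (by decide)
    | exact absurd (pv_endswith_excl n1 ['_', 'N'] ['_', 'p'] rfl h1N h1p) (by decide)
    | exact absurd (pv_endswith_excl n1 ['_', 'N'] ['_', 'n'] rfl h1N h1n) (by decide)
    | exact absurd (pv_endswith_excl n1 ['_', 'p'] ['_', 'n'] rfl h1p h1n) (by decide)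
    | exact absurd (pv_endswith_excl n2 ['_', 'P'] ['_', 'N'] rfl h2P h2N) (by decide)
    | exact absurd (pv_endswith_excl n2 ['_', 'P'] ['_', 'p'] rfl h2P h2p) (by decide)
    | exact absurd (pv_endswith_excl n2 ['_', 'P'] ['_', 'n'] rfl h2P h2n) (by decide)
    | exact absurd (pv_endswith_excl n2 ['_', 'N'] ['_', 'p'] rfl h2N h2p) (by decide)
    | exact absurd (pv_endswith_excl n2 ['_', 'N'] ['_', 'n'] rfl h2N h2n) (by decide)
    | exact absurd (pv_endswith_excl n2 ['_', 'p'] ['_', 'n'] rfl h2p h2n) (by decide)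
    | simp [pvLoopA, pvParse, pvParseLoop, h1P, h1N, h1p, h1n, h2P, h2N, h2p, h2n]

-- ===== VERDICT (by name: the statement is the Claim_ definition above) =====
theorem is_diff_pair_spec : Claim_equal_is_diff_pair := by
  intro net1 net2 _
  unfold Spec_is_diff_pair is_diff_pair is_diff_pair_alt
  exact pv_char_equiv net1.toList net2.toList
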